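-- pv_equiv track=rewrite | github.com/Gurukiran10/SyncMinds | meeting-intelligence-agent/backend/app/api/v1/endpoints/integrations.py | _select_zoom_recording_file
-- ===== SOURCE A (Python) =====
-- from typing import Optional, Dict, Any, List
--
-- def _select_zoom_recording_file(recording_files: List[Dict[str, Any]]) -> Optional[Dict[str, Any]]:
--     preferred_types = ["MP4", "M4A"]
--     completed_files = [f for f in recording_files if f.get("status", "completed") == "completed"]
--
--     for preferred_type in preferred_types:
--         match = next((f for f in completed_files if f.get("file_type") == preferred_type), None)
--         if match:
--             return match
--
--     return completed_files[0] if completed_files else None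
-- ===== SOURCE B (Python) =====
-- def _select_zoom_recording_file(recording_files):
--     completed_files = [f for f in recording_files if f.get("status", "completed") == "completed"]
--
--     def rank(f):
--         t = f.get("file_type")
--         return 0 if t == "MP4" else 1 if t == "M4A" else 2
--
--     return min(completed_files, key=rank, default=None)
-- ===== Notes on version B (the rewrite author's own statement) =====
-- stated objective: simpler
-- what changed: Replaces the two ordered next()-scans over preferred types plus the index-0 fallback with a single stable min over a 3-level rank key (MP4=0, M4A=1, other=2).
import Mathlib
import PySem

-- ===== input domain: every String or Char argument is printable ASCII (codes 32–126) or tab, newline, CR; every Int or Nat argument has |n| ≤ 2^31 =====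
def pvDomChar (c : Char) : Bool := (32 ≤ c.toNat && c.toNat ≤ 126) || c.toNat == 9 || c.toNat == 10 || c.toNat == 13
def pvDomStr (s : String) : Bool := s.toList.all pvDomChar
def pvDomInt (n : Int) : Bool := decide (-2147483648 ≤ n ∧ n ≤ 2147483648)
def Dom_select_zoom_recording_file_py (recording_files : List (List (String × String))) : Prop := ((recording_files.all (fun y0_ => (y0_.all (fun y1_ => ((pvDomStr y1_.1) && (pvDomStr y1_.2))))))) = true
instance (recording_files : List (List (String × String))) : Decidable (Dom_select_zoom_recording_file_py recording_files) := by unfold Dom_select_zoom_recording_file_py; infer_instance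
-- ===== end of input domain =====

-- B replaces A's two ordered next()-scans and index-0 fallback by one stable min over a 3-level rank key; same result, same cost.


-- dict.get(k) on an association list: value of the first matching key (shared primitive of both ports)
def pyDictGet? (f : List (String × String)) (k : String) : Option String :=
  (f.find? (fun p => p.1 == k)).map (·.2)

-- ===== PORT A =====
-- the 'for preferred_type in preferred_types' loop with early return; after the loop, 'completed_files[0] if completed_files else None'
def selA_loop (completed : List (List (String × String))) : List String → Option (List (String × String))
  | [] => match completed with | [] => none | f :: _ => some f
  | t :: rest =>
    match completed.find? (fun f => pyDictGet? f "file_type" == some t) with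
    | some f => if f == [] then selA_loop completed rest else some f   -- 'if match:' (dict truthiness)
    | none => selA_loop completed rest

def select_zoom_recording_file_py (recording_files : List (List (String × String))) : Option (List (String × String)) :=
  let completed_files := recording_files.filter (fun f => (pyDictGet? f "status").getD "completed" == "completed")
  selA_loop completed_files ["MP4", "M4A"]

-- ===== PORT B =====
def rankB (f : List (String × String)) : Int :=
  if pyDictGet? f "file_type" == some "MP4" then 0
  else if pyDictGet? f "file_type" == some "M4A" then 1
  else 2

-- Python's min(xs, key=key, default=None): first element of minimal key (hand port of the builtin; exact)
def pyMinByKey (xs : List (List (String × String))) (key : List (String × String) → Int) : Option (List (String × String)) :=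
  match xs with
  | [] => none
  | x :: t => some (t.foldl (fun best y => if key y < key best then y else best) x)

def select_zoom_recording_file_py_alt (recording_files : List (List (String × String))) : Option (List (String × String)) :=
  let completed_files := recording_files.filter (fun f => (pyDictGet? f "status").getD "completed" == "completed")
  pyMinByKey completed_files rankB

-- ===== PRECONDITION & SPEC =====
def Spec_select_zoom_recording_file_py (recording_files : List (List (String × String))) (out : Option (List (String × String))) : Prop := out = select_zoom_recording_file_py_alt recording_files
instance (recording_files : List (List (String × String))) (out : Option (List (String × String))) : Decidable (Spec_select_zoom_recording_file_py recording_files out) := by unfold Spec_select_zoom_recording_file_py; infer_instance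

-- ===== CLAIM (what is proved, stated in full; the proofs are below) =====
def Claim_equal_select_zoom_recording_file_py : Prop := ∀ (recording_files : List (List (String × String))), Dom_select_zoom_recording_file_py recording_files → Spec_select_zoom_recording_file_py recording_files (select_zoom_recording_file_py recording_files)

-- ===== LEMMAS AND PROOFS =====

theorem rankB_eq_zero (f : List (String × String)) :
    (rankB f == 0) = (pyDictGet? f "file_type" == some "MP4") := by
  unfold rankB; split_ifs with h h1 <;> simp_all

theorem rankB_eq_one (f : List (String × String)) :
    (rankB f == 1) = (pyDictGet? f "file_type" == some "M4A") := by
  unfold rankB; split_ifs with h h1 <;> simp_all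

theorem c0_ne_nil (f : List (String × String))
    (h : (pyDictGet? f "file_type" == some "MP4") = true) : (f == []) = false := by
  cases f <;> simp_all [pyDictGet?]

theorem c1_ne_nil (f : List (String × String))
    (h : (pyDictGet? f "file_type" == some "M4A") = true) : (f == []) = false := by
  cases f <;> simp_all [pyDictGet?]

-- characterisation of Python's min-fold over the 3-valued rank: first rank-0 element, else first rank-1, else the head
theorem fold_char (t : List (List (String × String))) :
    ∀ x, t.foldl (fun best y => if rankB y < rankB best then y else best) x =
      (match (x :: t).find? (fun y => rankB y == 0) with
       | some y => y
       | none =>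
         match (x :: t).find? (fun y => rankB y == 1) with
         | some y => y
         | none => x) := by
  induction t with
  | nil =>
    intro x
    by_cases h0 : (rankB x == 0) = true
    · simp [List.find?, h0]
    · by_cases h1 : (rankB x == 1) = true <;> simp [List.find?, h0, h1]
  | cons y t ih =>
    intro x
    have hx0 : rankB x = 0 ∨ rankB x = 1 ∨ rankB x = 2 := by
      unfold rankB; split_ifs <;> simp
    have hy0 : rankB y = 0 ∨ rankB y = 1 ∨ rankB y = 2 := by
      unfold rankB; split_ifs <;> simp
    simp only [List.foldl_cons]
    rw [ih]
    rcases hx0 with hx | hx | hx <;> rcases hy0 with hy | hy | hy <;>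
      simp [List.find?, hx, hy]

-- ===== VERDICT (by name: the statement is the Claim_ definition above) =====
theorem selA_eq_min (l : List (List (String × String))) :
    selA_loop l ["MP4", "M4A"] = pyMinByKey l rankB := by
  cases l with
  | nil => rfl
  | cons x t =>
    show selA_loop (x :: t) ["MP4", "M4A"] =
      some (t.foldl (fun best y => if rankB y < rankB best then y else best) x)
    rw [fold_char]
    unfold selA_loop
    have e0 : (fun y => rankB y == 0) = (fun f => pyDictGet? f "file_type" == some "MP4") :=
      funext rankB_eq_zero
    have e1 : (fun y => rankB y == 1) = (fun f => pyDictGet? f "file_type" == some "M4A") :=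
      funext rankB_eq_one
    rw [e0, e1]
    cases h0 : (x :: t).find? (fun f => pyDictGet? f "file_type" == some "MP4") with
    | some f =>
      have := List.find?_some h0
      simp [c0_ne_nil f this]
    | none =>
      unfold selA_loop
      cases h1 : (x :: t).find? (fun f => pyDictGet? f "file_type" == some "M4A") with
      | some f =>
        have := List.find?_some h1
        simp [c1_ne_nil f this]
      | none => rfl

theorem select_zoom_recording_file_py_spec : Claim_equal_select_zoom_recording_file_py := by
  intro rf _
  show selA_loop _ _ = pyMinByKey _ _
  exact selA_eq_min _
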